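-- pv_equiv track=rewrite | github.com/Vaishnavi-Senthilvel/AI-Hiring-System | src/matching_engine.py | _calculate_education_alignment
-- ===== SOURCE A (Python) =====
-- def _calculate_education_alignment(candidate_education, job_education_req):
--     """
--     Calculate education alignment score
--
--     Returns score 0-100
--     """
--     education_hierarchy = {
--         'high school': 1,
--         'diploma': 1,
--         'bachelor': 2,
--         'b.tech': 2,
--         'b.sc': 2,
--         'master': 3,
--         'm.tech': 3,
--         'm.sc': 3,
--         'mba': 3,
--         'phd': 4,
--         'doctorate': 4
--     }
--
--     try:
--         job_req_lower = str(job_education_req).lower()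
--
--         # Find minimum required education level from job description
--         required_level = 1
--         for edu_key, level in education_hierarchy.items():
--             if edu_key in job_req_lower:
--                 required_level = max(required_level, level)
--
--         # Compare with candidate's education level
--         candidate_level = int(candidate_education) if candidate_education else 0
--
--         if candidate_level >= required_level:
--             # Candidate meets or exceeds requirement
--             return 90 + min(10, (candidate_level - required_level) * 5)
--         else:
--             # Candidate below requirement
--             return max(30, 90 - (required_level - candidate_level) * 20)
--     except:
--         return 70  # Default score
-- ===== SOURCE B (Python) =====
-- def _calculate_education_alignment(candidate_education, job_education_req):
--     """Education alignment score via a level->keywords table scanned from the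
--     highest level down with an early exit, instead of a flat max-accumulator."""
--     level_keywords = {
--         4: ['phd', 'doctorate'],
--         3: ['master', 'm.tech', 'm.sc', 'mba'],
--         2: ['bachelor', 'b.tech', 'b.sc'],
--         1: ['high school', 'diploma'],
--     }
--     try:
--         job_req_lower = str(job_education_req).lower()
--
--         required_level = 1
--         for level in (4, 3, 2, 1):
--             if any(kw in job_req_lower for kw in level_keywords[level]):
--                 required_level = level
--                 break
--
--         candidate_level = int(candidate_education) if candidate_education else 0
--
--         if candidate_level >= required_level:
--             return 90 + min(10, (candidate_level - required_level) * 5)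
--         else:
--             return max(30, 90 - (required_level - candidate_level) * 20)
--     except:
--         return 70
-- ===== Notes on version B (the rewrite author's own statement) =====
-- stated objective: alternative
-- what changed: The flat keyword->level dict with a single-pass max-accumulator is replaced by a level->keywords table scanned from level 4 down with an early exit on the first level whose keyword group matches.
import Mathlib
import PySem

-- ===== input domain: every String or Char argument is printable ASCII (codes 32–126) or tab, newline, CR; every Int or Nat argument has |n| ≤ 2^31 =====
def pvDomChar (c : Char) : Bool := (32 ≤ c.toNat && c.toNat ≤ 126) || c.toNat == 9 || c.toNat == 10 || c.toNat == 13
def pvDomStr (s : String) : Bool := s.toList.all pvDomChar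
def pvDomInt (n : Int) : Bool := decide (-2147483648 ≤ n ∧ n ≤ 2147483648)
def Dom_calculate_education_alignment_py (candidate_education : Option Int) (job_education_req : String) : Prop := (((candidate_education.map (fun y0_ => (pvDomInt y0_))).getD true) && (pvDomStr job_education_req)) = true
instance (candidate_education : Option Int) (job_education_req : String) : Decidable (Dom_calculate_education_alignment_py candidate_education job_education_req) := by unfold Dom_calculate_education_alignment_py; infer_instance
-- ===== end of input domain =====

-- B replaces A's flat keyword→level max-accumulator with a level→keywords table
-- scanned from level 4 down, returning the first matching level (alternative decomposition).


-- ===== PORT A =====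
-- Literal transliteration of A: dict iterated in insertion order, max-accumulator.
-- The try/except never fires on Dom inputs (str()/int() of an int cannot raise), so no except branch is needed.
def calculate_education_alignment_py (candidate_education : Option Int) (job_education_req : String) : Int :=
  let education_hierarchy : List (String × Int) :=
    [("high school", 1), ("diploma", 1), ("bachelor", 2), ("b.tech", 2), ("b.sc", 2),
     ("master", 3), ("m.tech", 3), ("m.sc", 3), ("mba", 3), ("phd", 4), ("doctorate", 4)]
  let job_req_lower := PySem.Str.lower job_education_req
  let required_level : Int :=
    education_hierarchy.foldl
      (fun acc p => if PySem.Str.isIn p.1 job_req_lower then max acc p.2 else acc) 1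
  let candidate_level : Int :=
    match candidate_education with
    | none => 0
    | some n => if n == 0 then 0 else n   -- 'if candidate_education' is falsy for None and 0
  if candidate_level ≥ required_level then
    90 + min 10 ((candidate_level - required_level) * 5)
  else
    max 30 (90 - (required_level - candidate_level) * 20)

-- ===== PORT B =====
-- first level (scanning the table in order) whose keyword group has a member in job; default 1
def pvFirstLevel (job : String) : List (Int × List String) → Int
  | [] => 1
  | (lvl, kws) :: rest =>
      if kws.any (fun kw => PySem.Str.isIn kw job) then lvl else pvFirstLevel job rest

def calculate_education_alignment_py_alt (candidate_education : Option Int) (job_education_req : String) : Int :=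
  let job_req_lower := PySem.Str.lower job_education_req
  let required_level : Int :=
    pvFirstLevel job_req_lower
      [(4, ["phd", "doctorate"]), (3, ["master", "m.tech", "m.sc", "mba"]),
       (2, ["bachelor", "b.tech", "b.sc"]), (1, ["high school", "diploma"])]
  let candidate_level : Int :=
    match candidate_education with
    | none => 0
    | some n => if n == 0 then 0 else n
  if candidate_level ≥ required_level then
    90 + min 10 ((candidate_level - required_level) * 5)
  else
    max 30 (90 - (required_level - candidate_level) * 20)

-- ===== PRECONDITION & SPEC =====
def Spec_calculate_education_alignment_py (candidate_education : Option Int) (job_education_req : String) (out : Int) : Prop := out = calculate_education_alignment_py_alt candidate_education job_education_req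
instance (candidate_education : Option Int) (job_education_req : String) (out : Int) : Decidable (Spec_calculate_education_alignment_py candidate_education job_education_req out) := by unfold Spec_calculate_education_alignment_py; infer_instance

-- ===== CLAIM (what is proved, stated in full; the proofs are below) =====
def Claim_equal_calculate_education_alignment_py : Prop := ∀ (candidate_education : Option Int) (job_education_req : String), Dom_calculate_education_alignment_py candidate_education job_education_req → Spec_calculate_education_alignment_py candidate_education job_education_req (calculate_education_alignment_py candidate_education job_education_req)

-- ===== LEMMAS AND PROOFS =====
-- The two required-level computations agree: a pure Boolean fact about the 11 membership tests.
lemma required_level_eq (jl : String) :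
    ([("high school", (1:Int)), ("diploma", 1), ("bachelor", 2), ("b.tech", 2), ("b.sc", 2),
      ("master", 3), ("m.tech", 3), ("m.sc", 3), ("mba", 3), ("phd", 4), ("doctorate", 4)].foldl
        (fun acc p => if PySem.Str.isIn p.1 jl then max acc p.2 else acc) 1)
    = pvFirstLevel jl
        [(4, ["phd", "doctorate"]), (3, ["master", "m.tech", "m.sc", "mba"]),
         (2, ["bachelor", "b.tech", "b.sc"]), (1, ["high school", "diploma"])] := by
  simp only [List.foldl, pvFirstLevel, List.any_cons, List.any_nil]
  generalize PySem.Str.isIn "high school" jl = b1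
  generalize PySem.Str.isIn "diploma" jl = b2
  generalize PySem.Str.isIn "bachelor" jl = b3
  generalize PySem.Str.isIn "b.tech" jl = b4
  generalize PySem.Str.isIn "b.sc" jl = b5
  generalize PySem.Str.isIn "master" jl = b6
  generalize PySem.Str.isIn "m.tech" jl = b7
  generalize PySem.Str.isIn "m.sc" jl = b8
  generalize PySem.Str.isIn "mba" jl = b9
  generalize PySem.Str.isIn "phd" jl = b10
  generalize PySem.Str.isIn "doctorate" jl = b11
  revert b1 b2 b3 b4 b5 b6 b7 b8 b9 b10 b11
  decide

-- ===== VERDICT (by name: the statement is the Claim_ definition above) =====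
theorem calculate_education_alignment_py_spec : Claim_equal_calculate_education_alignment_py := by
  intro ce req _
  unfold Spec_calculate_education_alignment_py
  unfold calculate_education_alignment_py calculate_education_alignment_py_alt
  simp only [required_level_eq]
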